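-- pv_equiv track=rewrite | github.com/bc36/leetcode | lc_Python/lc2200_2299.py | sumScores
-- ===== SOURCE A (Python) =====
-- def sumScores(s: str) -> int:
--     visited = set()
--     res = 0
--     for start in range(1, len(s)):
--         if start in visited:
--             continue
--         count = 0
--         for i in range(start, len(s)):
--             if s[i] != s[i - start]:
--                 break
--             count += 1
--         res += count
--         for k in range(2 * start, count + 1, start):
--             res += count - (k - start)
--             visited.add(k)
--     return res + len(s)
-- ===== SOURCE B (Python) =====
-- def sumScores(s: str) -> int:
--     n = len(s)
--     z = [0] * n
--     l = 0
--     r = 0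
--     for i in range(1, n):
--         zi = 0
--         if i < r:
--             zi = min(r - i, z[i - l])
--         while i + zi < n and s[zi] == s[i + zi]:
--             zi += 1
--         z[i] = zi
--         if i + zi > r:
--             l = i
--             r = i + zi
--     return n + sum(z)
-- ===== Notes on version B (the rewrite author's own statement) =====
-- stated objective: faster
-- what changed: B computes all suffix-prefix match lengths with the Z-algorithm (maintaining the rightmost match window [l,r) and reusing earlier z-values) and sums the array, instead of A's rescanning from each unvisited start and crediting multiples via a visited set.
import Mathlib
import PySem

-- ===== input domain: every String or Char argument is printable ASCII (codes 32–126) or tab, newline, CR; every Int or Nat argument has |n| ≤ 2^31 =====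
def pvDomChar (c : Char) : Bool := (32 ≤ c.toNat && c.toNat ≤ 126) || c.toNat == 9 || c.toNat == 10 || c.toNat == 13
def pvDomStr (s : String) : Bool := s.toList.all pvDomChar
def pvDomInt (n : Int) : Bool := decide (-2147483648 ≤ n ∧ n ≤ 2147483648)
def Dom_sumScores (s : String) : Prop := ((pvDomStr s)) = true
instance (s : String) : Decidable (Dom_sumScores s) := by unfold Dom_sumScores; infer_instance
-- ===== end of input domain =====

-- B replaces A's rescan-from-each-unvisited-start with the linear Z-algorithm; return values proved equal.

-- ===== PORT A =====
-- inner loop 'for i in range(start, len(s)): if s[i] != s[i-start]: break; count += 1'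
-- (s[i] / s[i-start] ported with pyGetD: both indices are always in range here, so this is exact)
def innerA (idxs : List Int) (cs : List Char) (start count : Int) : Int :=
  match idxs with
  | [] => count
  | i :: rest =>
    if PySem.List.pyGetD cs i ' ' ≠ PySem.List.pyGetD cs (i - start) ' ' then count
    else innerA rest cs start (count + 1)

-- body of 'for start in range(1, len(s)): …' over the state (visited, res)
def stepA (cs : List Char) (n : Int) (st : PySem.Set Int × Int) (start : Int) :
    PySem.Set Int × Int :=
  if PySem.Set.contains st.1 start then st
  else
    let count := innerA (PySem.List.pyRange start n 1) cs start 0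
    (PySem.List.pyRange (2*start) (count+1) start).foldl
      (fun (p : PySem.Set Int × Int) k => (PySem.Set.add p.1 k, p.2 + (count - (k - start))))
      (st.1, st.2 + count)

def sumScores (s : String) : Int :=
  let cs := s.toList
  let n : Int := PySem.Str.len s
  let fin := (PySem.List.pyRange 1 n 1).foldl (stepA cs n) (PySem.Set.empty, 0)
  fin.2 + n

-- ===== PORT B =====
-- while loop 'while i + zi < n and s[zi] == s[i + zi]: zi += 1'
-- (s[zi] / s[i+zi] ported with pyGetD: indices are in range whenever tested, so this is exact)
def extendB (cs : List Char) (i : Int) (zi : Int) : Int :=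
  if h : i + zi < (cs.length : Int) ∧ PySem.List.pyGetD cs zi ' ' = PySem.List.pyGetD cs (i + zi) ' ' then
    extendB cs i (zi + 1)
  else zi
termination_by ((cs.length : Int) - (i + zi)).toNat
decreasing_by
  have := h.1
  omega

-- body of 'for i in range(1, n): …' over the state (z, l, r)
def stepB (cs : List Char) (n : Int) (st : List Int × Int × Int) (i : Int) :
    List Int × Int × Int :=
  let z := st.1
  let l := st.2.1
  let r := st.2.2
  let zi0 : Int := if i < r then min (r - i) (PySem.List.pyGetD z (i - l) 0) else 0
  let zi := extendB cs i zi0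
  let z' := PySem.List.pySetD z i zi
  if i + zi > r then (z', i, i + zi) else (z', l, r)

def sumScores_alt (s : String) : Int :=
  let cs := s.toList
  let n : Int := PySem.Str.len s
  let fin := (PySem.List.pyRange 1 n 1).foldl (stepB cs n) (PySem.List.pyRepeat [0] n, 0, 0)
  n + fin.1.sum

-- ===== PRECONDITION & SPEC =====
def Spec_sumScores (s : String) (out : Int) : Prop := out = sumScores_alt s
instance (s : String) (out : Int) : Decidable (Spec_sumScores s out) := by unfold Spec_sumScores; infer_instance

-- ===== CLAIM (what is proved, stated in full; the proofs are below) =====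
def Claim_equal_sumScores : Prop := ∀ (s : String), Dom_sumScores s → Spec_sumScores s (sumScores s)

-- ===== LEMMAS AND PROOFS =====

-- ## The mathematical yardstick: z-values (length of longest common prefix of cs and cs.drop i)

def lcpN : List Char → List Char → Nat
  | a :: as, b :: bs => if a = b then lcpN as bs + 1 else 0
  | _, _ => 0

def zN (cs : List Char) (i : Nat) : Nat := lcpN (cs.drop i) cs

def chF (cs : List Char) (j : Nat) : Char := cs.getD j ' '

theorem lcpN_le_left (a : List Char) : ∀ b : List Char, lcpN a b ≤ a.length := by
  induction a with
  | nil => intro b; cases b <;> simp [lcpN]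
  | cons x as ih =>
    intro b
    cases b with
    | nil => simp [lcpN]
    | cons y bs =>
      simp only [lcpN]
      split_ifs with h
      · simpa using Nat.succ_le_succ (ih bs)
      · simp

theorem lcpN_getD (a : List Char) : ∀ (b : List Char) (j : Nat), j < lcpN a b →
    a.getD j ' ' = b.getD j ' ' := by
  induction a with
  | nil => intro b j hj; cases b <;> simp [lcpN] at hj
  | cons x as ih =>
    intro b j hj
    cases b with
    | nil => simp [lcpN] at hj
    | cons y bs =>
      simp only [lcpN] at hj
      split_ifs at hj with h
      · cases j with
        | zero => simpa using h
        | succ j => simpa using ih bs j (by omega)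
      · omega

theorem lcpN_stop (a : List Char) : ∀ b : List Char, lcpN a b < a.length → lcpN a b < b.length →
    a.getD (lcpN a b) ' ' ≠ b.getD (lcpN a b) ' ' := by
  induction a with
  | nil => intro b h1 h2; simp at h1
  | cons x as ih =>
    intro b h1 h2
    cases b with
    | nil => simp at h2
    | cons y bs =>
      by_cases h : x = y
      · have e : lcpN (x :: as) (y :: bs) = lcpN as bs + 1 := by simp [lcpN, h]
        rw [e] at h1 h2 ⊢
        simp only [List.length_cons] at h1 h2
        simpa using ih bs (by omega) (by omega)
      · have e : lcpN (x :: as) (y :: bs) = 0 := by simp [lcpN, h]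
        rw [e]
        simpa using h

theorem lcpN_ge (a : List Char) : ∀ (b : List Char) (m : Nat),
    (∀ j, j < m → a.getD j ' ' = b.getD j ' ') → m ≤ a.length → m ≤ b.length →
    m ≤ lcpN a b := by
  induction a with
  | nil =>
    intro b m _ ha _
    have : m = 0 := by simpa using ha
    simp [this]
  | cons x as ih =>
    intro b m hm ha hb
    cases b with
    | nil =>
      have : m = 0 := by simpa using hb
      simp [this]
    | cons y bs =>
      cases m with
      | zero => omega
      | succ m =>
        have h0 : x = y := by simpa using hm 0 (by omega)
        simp only [lcpN, h0, if_pos]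
        have := ih bs m (fun j hj => by simpa using hm (j+1) (by omega)) (by simpa using ha) (by simpa using hb)
        omega

theorem getD_drop (cs : List Char) (i j : Nat) : (cs.drop i).getD j ' ' = cs.getD (i+j) ' ' := by
  simp [List.getD_eq_getElem?_getD, List.getElem?_drop]

theorem zN_le (cs : List Char) (i : Nat) : zN cs i ≤ cs.length - i := by
  have := lcpN_le_left (cs.drop i) cs
  simpa [zN] using this

theorem zN_add_le (cs : List Char) (i : Nat) : zN cs i = 0 ∨ i + zN cs i ≤ cs.length := by
  rcases Nat.lt_or_ge i cs.length with h | h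
  · right; have := zN_le cs i; omega
  · left
    have : cs.drop i = [] := List.drop_eq_nil_of_le (by omega)
    simp [zN, this, lcpN]

theorem zN_match (cs : List Char) (i j : Nat) (hj : j < zN cs i) :
    chF cs (i + j) = chF cs j := by
  have := lcpN_getD (cs.drop i) cs j hj
  rwa [getD_drop] at this

theorem zN_stop (cs : List Char) (i : Nat) (h : i + zN cs i < cs.length) :
    chF cs (i + zN cs i) ≠ chF cs (zN cs i) := by
  have h1 : zN cs i < (cs.drop i).length := by
    have := zN_le cs i
    simp only [List.length_drop]
    omega
  have h2 : zN cs i < cs.length := by omega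
  have := lcpN_stop (cs.drop i) cs h1 h2
  rwa [getD_drop] at this

theorem zN_ge (cs : List Char) (i m : Nat) (hm : ∀ j, j < m → chF cs (i + j) = chF cs j)
    (hle : i + m ≤ cs.length) : m ≤ zN cs i := by
  apply lcpN_ge
  · intro j hj
    rw [getD_drop]
    exact hm j hj
  · simp only [List.length_drop]; omega
  · omega

theorem zN_eq_of (cs : List Char) (i m : Nat)
    (hm : ∀ j, j < m → chF cs (i + j) = chF cs j)
    (hle : i + m ≤ cs.length)
    (hstop : i + m = cs.length ∨ chF cs (i + m) ≠ chF cs m) : zN cs i = m := by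
  have hge := zN_ge cs i m hm hle
  rcases Nat.lt_or_ge m (zN cs i) with hlt | hge2
  · exfalso
    have hmatch := zN_match cs i m hlt
    have hbound : i + zN cs i ≤ cs.length := by
      rcases zN_add_le cs i with h0 | h; · omega
      · exact h
    rcases hstop with hend | hne
    · omega
    · exact hne hmatch
  · omega

theorem chain (cs : List Char) (t c : Nat) (hc : ∀ j, j < c → chF cs (t + j) = chF cs j) :
    ∀ d i, i + d * t < t + c → chF cs (i + d * t) = chF cs i := by
  intro d
  induction d with
  | zero => intro i h; simp
  | succ d ih =>
    intro i h
    rw [Nat.succ_mul] at h ⊢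
    have hj : i + d * t < c := by omega
    have h1 : i + d * t + t = t + (i + d * t) := by omega
    rw [← Nat.add_assoc, h1, hc (i + d * t) hj]
    exact ih i (by omega)

theorem zN_mult (cs : List Char) (t k : Nat) (ht : 1 ≤ t) (hdvd : t ∣ k)
    (h2 : 2 * t ≤ k) (hkc : k ≤ zN cs t) : zN cs k = t + zN cs t - k := by
  set c := zN cs t with hc
  obtain ⟨m, hm⟩ := hdvd
  have hm' : k = m * t := by rw [hm]; ring
  have hm2 : 2 ≤ m := by
    rcases Nat.lt_or_ge m 2 with h | h
    · interval_cases m <;> omega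
    · exact h
  have hk0 : 2 ≤ k := by omega
  have hlen : t + c ≤ cs.length := by
    rcases zN_add_le cs t with h0 | h
    · omega
    · exact h
  have hmatch : ∀ j, j < c → chF cs (t + j) = chF cs j := fun j hj => zN_match cs t j hj
  apply zN_eq_of
  · intro j hj
    have : k + j = j + m * t := by omega
    rw [this]
    exact chain cs t c hmatch m j (by omega)

  · omega
  · rcases Nat.eq_or_lt_of_le hlen with hend | hmid
    · left; omega
    · right
      have hstop := zN_stop cs t (by omega)
      have hkv : k + (t + c - k) = t + c := by omega
      rw [hkv]
      have hmt : (m - 1) * t = k - t := by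
        rw [Nat.sub_mul, one_mul, ← hm']
      have hcv : (t + c - k) + (m - 1) * t = c := by rw [hmt]; omega
      have hchain := chain cs t c hmatch (m - 1) (t + c - k) (by rw [hmt]; omega)
      rw [hcv] at hchain
      rw [← hchain]
      exact hstop

theorem gcd_sub_eq (p q : Nat) (h : q ≤ p) : Nat.gcd (p - q) q = Nat.gcd p q := by
  rw [Nat.gcd_comm (p - q) q, Nat.gcd_comm p q]
  conv_rhs => rw [← Nat.sub_add_cancel h]
  rw [Nat.gcd_add_self_right]

theorem fineWilf (cs : List Char) (N : Nat) :
    ∀ p q L, 0 < p → 0 < q → p + q ≤ N → p + q ≤ L →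
    (∀ i, i + p < L → chF cs (i + p) = chF cs i) →
    (∀ i, i + q < L → chF cs (i + q) = chF cs i) →
    ∀ i, i + p + q < L + Nat.gcd p q → chF cs (i + Nat.gcd p q) = chF cs i := by
  induction N with
  | zero => intro p q L hp hq hN; omega
  | succ N ih =>
    intro p q L hp hq hN hL P Q i hi
    rcases lt_trichotomy p q with hlt | heq | hgt
    · -- symmetric: use periods q and p with the (big, small) = (q, p) step
      have hstep : ∀ j, j + (q - p) < L - p → chF cs (j + (q - p)) = chF cs j := by
        intro j hj
        have h1 : j + (q - p) + p = j + q := by omega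
        have h2 := P (j + (q - p)) (by omega)
        rw [h1] at h2
        rw [← h2]
        exact Q j (by omega)
      have hrestr : ∀ j, j + p < L - p → chF cs (j + p) = chF cs j := by
        intro j hj; exact P j (by omega)
      have hg : Nat.gcd (q - p) p = Nat.gcd p q := by
        rw [gcd_sub_eq q p (by omega), Nat.gcd_comm]
      have := ih (q - p) p (L - p) (by omega) hp (by omega) (by omega) hstep hrestr i (by omega)
      rwa [hg] at this
    · subst heq
      rw [Nat.gcd_self] at hi ⊢
      exact P i (by omega)
    · have hstep : ∀ j, j + (p - q) < L - q → chF cs (j + (p - q)) = chF cs j := by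
        intro j hj
        have h1 : j + (p - q) + q = j + p := by omega
        have h2 := Q (j + (p - q)) (by omega)
        rw [h1] at h2
        rw [← h2]
        exact P j (by omega)
      have hrestr : ∀ j, j + q < L - q → chF cs (j + q) = chF cs j := by
        intro j hj; exact Q j (by omega)
      have hg : Nat.gcd (p - q) q = Nat.gcd p q := gcd_sub_eq p q (by omega)
      have := ih (p - q) q (L - q) (by omega) hq (by omega) (by omega) hstep hrestr i (by omega)
      rwa [hg] at this

-- ## The bookkeeping of A: which starts are processed, and who gets credited

def addsB (cs : List Char) (a k : Nat) : Bool :=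
  decide (a ∣ k) && decide (2 * a ≤ k) && decide (k ≤ zN cs a)

abbrev addsP (cs : List Char) (a k : Nat) : Prop := addsB cs a k = true

theorem addsP_iff (cs : List Char) (a k : Nat) :
    addsP cs a k ↔ (a ∣ k ∧ 2 * a ≤ k ∧ k ≤ zN cs a) := by
  unfold addsP addsB
  simp [and_assoc]

def procB (cs : List Char) (s : Nat) : Bool :=
  (List.range s).attach.all (fun a => !(procB cs a.1 && addsB cs a.1 s))
termination_by s
decreasing_by exact List.mem_range.mp a.2

theorem procB_iff (cs : List Char) (s : Nat) :
    procB cs s = true ↔ ∀ a, a < s → procB cs a = true → ¬ addsP cs a s := by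
  rw [procB]
  simp only [List.all_eq_true, List.mem_attach, forall_const]
  constructor
  · intro h a ha hpa hadds
    have := h ⟨a, List.mem_range.mpr ha⟩
    unfold addsP at hadds
    simp [hpa, hadds] at this
  · intro h a
    by_cases hp : procB cs a.1 = true
    · have hna := h a.1 (List.mem_range.mp a.2) hp
      unfold addsP at hna
      cases hb : addsB cs a.1 s
      · simp [hp, hb]
      · exact absurd hb hna
    · simp [hp]

theorem two_mul_le_of_dvd_lt (g a : Nat) (hg : 0 < g) (hdvd : g ∣ a) (hlt : g < a) :
    2 * g ≤ a := by
  obtain ⟨m, hm⟩ := hdvd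
  have : 2 ≤ m := by
    rcases Nat.lt_or_ge m 2 with h | h
    · interval_cases m <;> omega
    · exact h
  calc 2 * g = g * 2 := by ring
  _ ≤ g * m := Nat.mul_le_mul_left g this
  _ = a := hm.symm

theorem pos_of_addsP (cs : List Char) (a k : Nat) (hk : 1 ≤ k) (h : addsP cs a k) : 1 ≤ a := by
  obtain ⟨hdvd, -, -⟩ := (addsP_iff cs a k).mp h
  rcases Nat.eq_zero_or_pos a with rfl | h
  · simp at hdvd; omega
  · exact h

theorem no_double (cs : List Char) (a₁ a₂ k : Nat) (h1 : 1 ≤ a₁) (h12 : a₁ < a₂)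
    (hp1 : procB cs a₁ = true) (hp2 : procB cs a₂ = true)
    (hk1 : addsP cs a₁ k) (hk2 : addsP cs a₂ k) : False := by
  obtain ⟨hd1, h2a1, hkc1⟩ := (addsP_iff cs a₁ k).mp hk1
  obtain ⟨hd2, h2a2, hkc2⟩ := (addsP_iff cs a₂ k).mp hk2
  set c₁ := zN cs a₁ with hc₁
  set c₂ := zN cs a₂ with hc₂
  have hnd : ¬ a₁ ∣ a₂ := by
    intro hdvd
    exact (procB_iff cs a₂).mp hp2 a₁ h12 hp1
      ((addsP_iff cs a₁ a₂).mpr ⟨hdvd, two_mul_le_of_dvd_lt a₁ a₂ h1 hdvd h12, by omega⟩)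
  set g := Nat.gcd a₁ a₂ with hgdef
  have hg1 : 0 < g := Nat.gcd_pos_of_pos_left a₂ h1
  have hga1 : g ∣ a₁ := Nat.gcd_dvd_left a₁ a₂
  have hga2 : g ∣ a₂ := Nat.gcd_dvd_right a₁ a₂
  have hglt : g < a₁ := by
    rcases Nat.lt_or_ge g a₁ with h | h
    · exact h
    · exfalso
      have : g = a₁ := le_antisymm (Nat.le_of_dvd (by omega) hga1) h
      rw [this] at hga2
      exact hnd hga2
  have hg2a1 : 2 * g ≤ a₁ := two_mul_le_of_dvd_lt g a₁ hg1 hga1 hglt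
  have hlen1 : a₁ + c₁ ≤ cs.length := by
    rcases zN_add_le cs a₁ with h0 | h; · omega
    · exact h
  have hlen2 : a₂ + c₂ ≤ cs.length := by
    rcases zN_add_le cs a₂ with h0 | h; · omega
    · exact h
  set L := min (a₁ + c₁) (a₂ + c₂) with hL
  have hP : ∀ i, i + a₂ < L → chF cs (i + a₂) = chF cs i := by
    intro i hi
    have := zN_match cs a₂ i (by omega)
    rwa [Nat.add_comm a₂ i] at this
  have hQ : ∀ i, i + a₁ < L → chF cs (i + a₁) = chF cs i := by
    intro i hi
    have := zN_match cs a₁ i (by omega)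
    rwa [Nat.add_comm a₁ i] at this
  have hfw := fineWilf cs (a₁ + a₂) a₂ a₁ L (by omega) (by omega) (by omega) (by omega) hP hQ
  rw [Nat.gcd_comm a₂ a₁, ← hgdef] at hfw
  set M := L + g - a₁ - a₂ with hM
  have hzg : M ≤ zN cs g := by
    apply zN_ge
    · intro j hj
      have := hfw j (by omega)
      rwa [Nat.add_comm j g] at this
    · omega
  have hMa1 : a₁ + 1 ≤ M := by
    have hLge : a₁ + k ≤ L := by omega
    omega
  by_cases hpg : procB cs g = true
  · exact (procB_iff cs a₁).mp hp1 g hglt hpg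
      ((addsP_iff cs g a₁).mpr ⟨Nat.dvd_trans (dvd_refl g) hga1, hg2a1, by omega⟩)
  · have : ¬ ∀ a, a < g → procB cs a = true → ¬ addsP cs a g := fun h => hpg ((procB_iff cs g).mpr h)
    push Not at this
    obtain ⟨a₀, ha₀g, hpa₀, hadds₀⟩ := this
    obtain ⟨hd₀, h2a₀, hgc₀⟩ := (addsP_iff cs a₀ g).mp hadds₀
    have ha₀1 : 1 ≤ a₀ := pos_of_addsP cs a₀ g (by omega) hadds₀
    set c₀ := zN cs a₀ with hc₀
    have hzgval : zN cs g = a₀ + c₀ - g := zN_mult cs a₀ g ha₀1 hd₀ h2a₀ hgc₀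
    have hc₀ge : M ≤ c₀ := by
      have := hzg
      rw [hzgval] at this
      omega
    have hga1le : g ≤ a₁ := Nat.le_of_dvd (by omega) hga1
    exact (procB_iff cs a₁).mp hp1 a₀ (by omega) hpa₀
      ((addsP_iff cs a₀ a₁).mpr ⟨Nat.dvd_trans hd₀ hga1, by omega, by omega⟩)

theorem counting (cs : List Char) :
    ∑ a ∈ (Finset.range cs.length).filter (fun a => 1 ≤ a ∧ procB cs a = true),
      (zN cs a + ∑ k ∈ (Finset.range cs.length).filter (fun k => addsP cs a k), zN cs k)
    = ∑ i ∈ (Finset.range cs.length).filter (fun i => 1 ≤ i), zN cs i := by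
  classical
  set n := cs.length with hn
  set idx := (Finset.range n).filter (fun a => 1 ≤ a ∧ procB cs a = true) with hidx
  set S : Nat → Finset Nat := fun a => insert a ((Finset.range n).filter (fun k => addsP cs a k)) with hS
  have hmemS : ∀ a x, x ∈ S a ↔ x = a ∨ (x < n ∧ addsP cs a x) := by
    intro a x
    simp [hS, Finset.mem_insert, Finset.mem_filter, Finset.mem_range, and_comm]
  have hmemidx : ∀ a, a ∈ idx ↔ a < n ∧ 1 ≤ a ∧ procB cs a = true := by
    intro a; simp [hidx, Finset.mem_filter, Finset.mem_range]
  have hdisj : (↑idx : Set Nat).PairwiseDisjoint S := by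
    intro a ha b hb hab
    rw [Finset.mem_coe, hmemidx] at ha hb
    simp only [Function.onFun]
    rw [Finset.disjoint_left]
    intro x hxa hxb
    rw [hmemS] at hxa hxb
    have key : ∀ u v : Nat, u < n → 1 ≤ u → procB cs u = true → v < n → 1 ≤ v →
        procB cs v = true → addsP cs u v → False := by
      intro u v _ hu hpu _ _ hpv hadds
      have huv : u < v := by
        obtain ⟨-, h2, -⟩ := (addsP_iff cs u v).mp hadds
        omega
      exact (procB_iff cs v).mp hpv u huv hpu hadds
    rcases hxa with rfl | ⟨hxn, hax⟩
    · rcases hxb with rfl | ⟨-, hbx⟩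
      · exact hab rfl
      · exact key b x hb.1 hb.2.1 hb.2.2 ha.1 ha.2.1 ha.2.2 hbx
    · rcases hxb with rfl | ⟨-, hbx⟩
      · exact key a x ha.1 ha.2.1 ha.2.2 hb.1 hb.2.1 hb.2.2 hax
      · have ha1 : 1 ≤ a := ha.2.1
        have hb1 : 1 ≤ b := hb.2.1
        rcases lt_trichotomy a b with h | h | h
        · exact no_double cs a b x ha1 h ha.2.2 hb.2.2 hax hbx
        · exact hab h
        · exact no_double cs b a x hb1 h hb.2.2 ha.2.2 hbx hax
  have hcover : idx.biUnion S = (Finset.range n).filter (fun i => 1 ≤ i) := by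
    ext x
    simp only [Finset.mem_biUnion, Finset.mem_filter, Finset.mem_range]
    constructor
    · rintro ⟨a, ha, hx⟩
      rw [hmemidx] at ha
      rw [hmemS] at hx
      rcases hx with rfl | ⟨hxn, hadds⟩
      · exact ⟨ha.1, ha.2.1⟩
      · obtain ⟨-, h2, -⟩ := (addsP_iff cs a x).mp hadds
        exact ⟨hxn, by omega⟩
    · rintro ⟨hxn, hx1⟩
      by_cases hpx : procB cs x = true
      · exact ⟨x, (hmemidx x).mpr ⟨hxn, hx1, hpx⟩, (hmemS x x).mpr (Or.inl rfl)⟩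
      · have : ¬ ∀ a, a < x → procB cs a = true → ¬ addsP cs a x :=
          fun h => hpx ((procB_iff cs x).mpr h)
        push Not at this
        obtain ⟨a, hax, hpa, hadds⟩ := this
        have ha1 : 1 ≤ a := pos_of_addsP cs a x hx1 hadds
        exact ⟨a, (hmemidx a).mpr ⟨by omega, ha1, hpa⟩, (hmemS a x).mpr (Or.inr ⟨hxn, hadds⟩)⟩
  have hsum := Finset.sum_biUnion (f := fun k => zN cs k) hdisj
  rw [hcover] at hsum
  have hsum2 : ∑ i ∈ (Finset.range n).filter (fun i => 1 ≤ i), zN cs i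
      = ∑ a ∈ idx, ∑ k ∈ S a, zN cs k := by simpa using hsum
  rw [hsum2]
  apply Finset.sum_congr rfl
  intro a ha
  rw [hmemidx] at ha
  have hnotmem : a ∉ (Finset.range n).filter (fun k => addsP cs a k) := by
    simp only [Finset.mem_filter, Finset.mem_range]
    rintro ⟨-, hadds⟩
    obtain ⟨-, h2, -⟩ := (addsP_iff cs a a).mp hadds
    omega
  rw [hS]
  rw [Finset.sum_insert hnotmem]


-- ## Bridging A's inner loop to lcpN

theorem innerA_eq (cs : List Char) (t : Nat) (ht : 1 ≤ t) :
    ∀ (fuel j : Nat) (c : Int), cs.length - j ≤ fuel → t ≤ j →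
    innerA (PySem.List.pyRange (j : Int) (cs.length : Int) 1) cs (t : Int) c
      = c + (lcpN (cs.drop j) (cs.drop (j - t)) : Int) := by
  intro fuel
  induction fuel with
  | zero =>
    intro j c hfuel htj
    have hj : cs.length ≤ j := by omega
    rw [PySem.List.pyRange_one_eq_nil (by exact_mod_cast hj)]
    have hd : cs.drop j = [] := List.drop_eq_nil_of_le hj
    simp [innerA, hd, lcpN]
  | succ fuel ih =>
    intro j c hfuel htj
    rcases Nat.lt_or_ge j cs.length with hj | hj
    case inr =>
      rw [PySem.List.pyRange_one_eq_nil (by exact_mod_cast hj)]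
      have hd : cs.drop j = [] := List.drop_eq_nil_of_le hj
      simp [innerA, hd, lcpN]
    · rw [PySem.List.pyRange_one_cons (by exact_mod_cast hj)]
      have hjt : ((j:Int) - (t:Int)) = ((j - t : Nat) : Int) := by push_cast; omega
      have hjtlt : j - t < cs.length := by omega
      have hdropj := List.drop_eq_getElem_cons (l := cs) (i := j) hj
      have hdropjt := List.drop_eq_getElem_cons (l := cs) (i := j - t) hjtlt
      have hg1 : cs.getD j ' ' = cs[j] := List.getD_eq_getElem cs ' ' hj
      have hg2 : cs.getD (j - t) ' ' = cs[j - t] := List.getD_eq_getElem cs ' ' hjtlt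
      simp only [innerA, hjt, PySem.List.pyGetD_natCast, hg1, hg2]
      by_cases heq : cs[j] = cs[j - t]
      · rw [if_neg (by simp [heq])]
        have hcast : (j:Int) + 1 = ((j+1 : Nat) : Int) := by push_cast; ring
        rw [hcast, ih (j+1) (c+1) (by omega) (by omega)]
        rw [hdropj, hdropjt]
        have hsub : j + 1 - t = (j - t) + 1 := by omega
        rw [hsub]
        simp only [lcpN, heq, if_pos]
        push_cast
        ring
      · rw [if_pos (by simp [heq])]
        rw [hdropj, hdropjt]
        simp [lcpN, heq]

theorem countA_eq (cs : List Char) (t : Nat) (ht : 1 ≤ t) :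
    innerA (PySem.List.pyRange (t : Int) (cs.length : Int) 1) cs (t : Int) 0
      = (zN cs t : Int) := by
  have h := innerA_eq cs t ht cs.length t 0 (by omega) (le_refl t)
  simpa [zN, Nat.sub_self] using h

-- ## The list of multiples A's third loop walks through

def mulListN (t c : Nat) : List Nat := (List.range ((c - t)/t)).map (fun q => (q+2)*t)

def castList (l : List Nat) : List Int := l.map (fun k => ((k : Nat) : Int))

theorem KL_eq (t c : Nat) (ht : 1 ≤ t) :
    PySem.List.pyRange (2*(t:Int)) ((c:Int)+1) (t:Int) = castList (mulListN t c) := by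
  rw [PySem.List.pyRange_of_pos _ _ (by exact_mod_cast ht)]
  have hcount : (if 2*(t:Int) < (c:Int)+1 then (((c:Int)+1 - 2*(t:Int) + (t:Int) - 1) / (t:Int)).toNat else 0)
      = (c - t)/t := by
    by_cases h : 2*t ≤ c
    · rw [if_pos (by exact_mod_cast (by omega : 2*(t:Int) < (c:Int)+1))]
      have hnum : (c:Int)+1 - 2*(t:Int) + (t:Int) - 1 = ((c - t : Nat) : Int) := by push_cast; omega
      rw [hnum]
      rw [← Int.natCast_div]
      exact Int.toNat_natCast _
    · rw [if_neg (by exact_mod_cast (by omega : ¬ (2*(t:Int) < (c:Int)+1)))]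
      have : c - t < t := by omega
      rw [Nat.div_eq_of_lt this]
  rw [hcount]
  unfold castList mulListN
  rw [List.map_map]
  apply List.map_congr_left
  intro q _
  simp only [Function.comp]
  push_cast
  ring

theorem mem_mulListN (t c k : Nat) (ht : 1 ≤ t) :
    k ∈ mulListN t c ↔ (t ∣ k ∧ 2*t ≤ k ∧ k ≤ c) := by
  unfold mulListN
  simp only [List.mem_map, List.mem_range]
  constructor
  · rintro ⟨q, hq, rfl⟩
    refine ⟨⟨q+2, by ring⟩, Nat.mul_le_mul_right t (by omega), ?_⟩
    have h1 : q + 1 ≤ (c - t)/t := by omega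
    have h2 : (q+1) * t ≤ c - t := (Nat.le_div_iff_mul_le (show 0 < t by omega)).mp h1
    have h3 : (q+2)*t = (q+1)*t + t := by ring
    have h5 : 1 * t ≤ c - t := (Nat.le_div_iff_mul_le (show 0 < t by omega)).mp (by omega)
    omega
  · rintro ⟨⟨m, rfl⟩, h2, hc⟩
    have hm2 : 2 ≤ m := by
      by_contra h
      interval_cases m <;> omega
    refine ⟨m - 2, ?_, by rw [Nat.sub_add_cancel hm2]; ring⟩
    have h1 : (m - 2 + 1) * t ≤ c - t := by
      have e : (m - 2 + 1) * t = t * m - t := by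
        rw [Nat.add_mul, Nat.sub_mul, one_mul, Nat.mul_comm]
        omega
      rw [e]
      omega
    have := (Nat.le_div_iff_mul_le (show 0 < t by omega)).mpr h1
    omega

theorem nodup_mulListN (t c : Nat) (ht : 1 ≤ t) : (mulListN t c).Nodup := by
  unfold mulListN
  apply List.Nodup.map _ (List.nodup_range)
  intro a b h
  simp only at h
  have := Nat.eq_of_mul_eq_mul_right (show 0 < t by omega) h
  omega

theorem foldA_pair (t c : Int) (l : List Nat) : ∀ (v : PySem.Set Int) (r : Int),
    (castList l).foldl
      (fun (p : PySem.Set Int × Int) k => (PySem.Set.add p.1 k, p.2 + (c - (k - t)))) (v, r)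
    = (l.foldl (fun vv (k : Nat) => PySem.Set.add vv (k:Int)) v,
       r + (l.map (fun (k : Nat) => c - ((k:Int) - t))).sum) := by
  induction l with
  | nil => intro v r; simp [castList]
  | cons k ks ih =>
    intro v r
    simp only [castList, List.map_cons, List.foldl_cons, List.sum_cons]
    rw [show (ks.map fun k => ((k:Nat):Int)) = castList ks from rfl, ih]
    refine Prod.ext rfl ?_
    simp only
    ring

theorem sum_credit (cs : List Char) (t : Nat) (ht : 1 ≤ t) :
    ((mulListN t (zN cs t)).map (fun (k : Nat) => ((zN cs t : Nat) : Int) - ((k:Int) - (t:Int)))).sum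
    = ((∑ k ∈ (Finset.range cs.length).filter (fun k => addsP cs t k), zN cs k : Nat) : Int) := by
  have hmapeq : (mulListN t (zN cs t)).map (fun (k : Nat) => ((zN cs t : Nat) : Int) - ((k:Int) - (t:Int)))
      = (mulListN t (zN cs t)).map (fun (k : Nat) => ((zN cs k : Nat) : Int)) := by
    apply List.map_congr_left
    intro k hk
    rw [mem_mulListN t _ k ht] at hk
    obtain ⟨hd, h2, hc⟩ := hk
    rw [zN_mult cs t k ht hd h2 hc]
    push_cast
    omega
  rw [hmapeq]
  have hfs : ((mulListN t (zN cs t)).map (fun (k : Nat) => ((zN cs k : Nat) : Int))).sum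
      = (((mulListN t (zN cs t)).map (fun k => zN cs k)).sum : Int) := by
    rw [Nat.cast_list_sum, List.map_map]
    rfl
  rw [hfs]
  congr 1
  rw [← List.sum_toFinset _ (nodup_mulListN t _ ht)]
  apply Finset.sum_congr _ (fun _ _ => rfl)
  ext k
  rw [List.mem_toFinset, mem_mulListN t _ k ht]
  simp only [Finset.mem_filter, Finset.mem_range, addsP_iff]
  constructor
  · rintro ⟨hd, h2, hc⟩
    have hzle := zN_le cs t
    refine ⟨by omega, hd, h2, hc⟩
  · rintro ⟨-, hd, h2, hc⟩
    exact ⟨hd, h2, hc⟩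


-- ## The loop invariant of A's outer fold

def visInv (cs : List Char) (t : Nat) (v : PySem.Set Int) : Prop :=
  ∀ x : Int, x ∈ v ↔ ∃ k : Nat, x = (k:Int) ∧
    ∃ a, 1 ≤ a ∧ a < t ∧ procB cs a = true ∧ addsP cs a k

def resVal (cs : List Char) (t : Nat) : Nat :=
  ∑ a ∈ (Finset.range t).filter (fun a => 1 ≤ a ∧ procB cs a = true),
    (zN cs a + ∑ k ∈ (Finset.range cs.length).filter (fun k => addsP cs a k), zN cs k)

theorem resVal_one (cs : List Char) : resVal cs 1 = 0 := by
  simp [resVal, Finset.range_one, Finset.filter_singleton]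

theorem resVal_succ_proc (cs : List Char) (t : Nat) (ht : 1 ≤ t) (hp : procB cs t = true) :
    resVal cs (t+1)
      = (zN cs t + ∑ k ∈ (Finset.range cs.length).filter (fun k => addsP cs t k), zN cs k)
        + resVal cs t := by
  unfold resVal
  rw [Finset.range_add_one, Finset.filter_insert, if_pos ⟨ht, hp⟩,
    Finset.sum_insert (by simp [Finset.mem_filter])]

theorem resVal_succ_skip (cs : List Char) (t : Nat) (hp : procB cs t ≠ true) :
    resVal cs (t+1) = resVal cs t := by
  unfold resVal
  rw [Finset.range_add_one, Finset.filter_insert, if_neg (fun h => hp h.2)]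

theorem A_base (cs : List Char) (t : Nat) (hn : cs.length ≤ t) (hle : t ≤ cs.length ∨ t = 1) :
    resVal cs t = resVal cs cs.length := by
  rcases hle with h | h
  · have : t = cs.length := by omega
    rw [this]
  · subst h
    rcases Nat.lt_or_ge cs.length 1 with h0 | h1
    · have h00 : cs.length = 0 := by omega
      rw [h00, resVal_one]
      simp [resVal]
    · have h11 : cs.length = 1 := by omega
      rw [h11]

theorem A_loop (cs : List Char) :
    ∀ (fuel t : Nat) (v : PySem.Set Int) (r : Int),
    cs.length - t ≤ fuel → 1 ≤ t → (t ≤ cs.length ∨ t = 1) →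
    visInv cs t v → r = ((resVal cs t : Nat) : Int) →
    ((PySem.List.pyRange (t:Int) (cs.length:Int) 1).foldl (stepA cs (cs.length:Int)) (v, r)).2
      = ((resVal cs cs.length : Nat) : Int) := by
  intro fuel
  induction fuel with
  | zero =>
    intro t v r hfuel ht hle hvis hr
    have hn : cs.length ≤ t := by omega
    rw [PySem.List.pyRange_one_eq_nil (by exact_mod_cast hn), List.foldl_nil]
    simp only [hr]
    exact congrArg (fun m : Nat => (m : Int)) (A_base cs t hn hle)
  | succ fuel ih =>
    intro t v r hfuel ht hle hvis hr
    rcases Nat.lt_or_ge t cs.length with hlt | hge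
    case inr =>
      rw [PySem.List.pyRange_one_eq_nil (by exact_mod_cast hge), List.foldl_nil]
      simp only [hr]
      exact congrArg (fun m : Nat => (m : Int)) (A_base cs t hge hle)
    · rw [PySem.List.pyRange_one_cons (by exact_mod_cast hlt), List.foldl_cons]
      have hcontiff : PySem.Set.contains v (t:Int) = true ↔ procB cs t = false := by
        rw [PySem.Set.contains_iff, hvis ((t:Nat):Int)]
        constructor
        · rintro ⟨k, hk, a, ha1, hat, hpa, hadds⟩
          have hkt : t = k := by exact_mod_cast hk
          subst hkt
          cases hb : procB cs t with
          | false => rfl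
          | true => exact absurd hadds ((procB_iff cs t).mp hb a hat hpa)
        · intro hfalse
          have hnot : ¬ (∀ a, a < t → procB cs a = true → ¬ addsP cs a t) := by
            intro hall
            rw [(procB_iff cs t).mpr hall] at hfalse
            exact absurd hfalse (by decide)
          push Not at hnot
          obtain ⟨a, hat, hpa, hadds⟩ := hnot
          exact ⟨t, rfl, a, pos_of_addsP cs a t (by omega) hadds, hat, hpa, hadds⟩
      by_cases hp : procB cs t = true
      · have hcont : PySem.Set.contains v (t:Int) = false := by
          rw [Bool.eq_false_iff]
          intro hc
          rw [hcontiff.mp hc] at hp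
          exact absurd hp (by decide)
        simp only [stepA, hcont, Bool.false_eq_true, if_false]
        rw [countA_eq cs t ht, KL_eq t (zN cs t) ht, foldA_pair]
        have hc1 : ((t:Int)) + 1 = (((t+1 : Nat)):Int) := by push_cast; ring
        rw [hc1]
        apply ih (t+1) _ _ (by omega) (by omega) (by omega)
        · intro x
          rw [PySem.Set.mem_foldl_add, hvis x]
          constructor
          · rintro (⟨k, hk, a, ha1, hat, hpa, hadds⟩ | ⟨k, hkmem, hk⟩)
            · exact ⟨k, hk, a, ha1, by omega, hpa, hadds⟩
            · exact ⟨k, hk, t, ht, by omega, hp,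
                (addsP_iff cs t k).mpr (((mem_mulListN t _ k ht).mp hkmem).imp id (fun h => h.imp id (fun h2 => h2)))⟩
          · rintro ⟨k, hk, a, ha1, hat1, hpa, hadds⟩
            rcases Nat.lt_or_ge a t with halt | hage
            · exact Or.inl ⟨k, hk, a, ha1, halt, hpa, hadds⟩
            · have hat : a = t := by omega
              subst hat
              exact Or.inr ⟨k, (mem_mulListN a _ k ht).mpr ((addsP_iff cs a k).mp hadds), hk⟩
        · rw [sum_credit cs t ht, hr, resVal_succ_proc cs t ht hp]
          push_cast
          ring
      · have hcont : PySem.Set.contains v (t:Int) = true := by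
          rw [hcontiff]
          cases hb : procB cs t with
          | false => rfl
          | true => exact absurd hb hp
        simp only [stepA, hcont, if_true]
        have hc1 : ((t:Int)) + 1 = (((t+1 : Nat)):Int) := by push_cast; ring
        rw [hc1]
        apply ih (t+1) _ _ (by omega) (by omega) (by omega)
        · intro x
          rw [hvis x]
          constructor
          · rintro ⟨k, hk, a, ha1, hat, hpa, hadds⟩
            exact ⟨k, hk, a, ha1, by omega, hpa, hadds⟩
          · rintro ⟨k, hk, a, ha1, hat1, hpa, hadds⟩
            have halt : a < t := by
              rcases Nat.lt_or_ge a t with h | h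
              · exact h
              · exfalso
                have : a = t := by omega
                rw [this] at hpa
                exact hp hpa
            exact ⟨k, hk, a, ha1, halt, hpa, hadds⟩
        · rw [hr, resVal_succ_skip cs t hp]

theorem A_val (s : String) :
    sumScores s
      = ((resVal s.toList s.toList.length : Nat) : Int) + (s.toList.length : Int) := by
  have hform : sumScores s
      = ((PySem.List.pyRange ((1:Nat):Int) ((s.toList.length : Nat):Int) 1).foldl
          (stepA s.toList ((s.toList.length : Nat):Int)) (PySem.Set.empty, 0)).2
        + ((s.toList.length : Nat):Int) := by
    unfold sumScores
    rw [PySem.Str.len_eq]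
    rfl
  rw [hform]
  congr 1
  apply A_loop s.toList s.toList.length 1 PySem.Set.empty 0 (by omega) (le_refl 1) (Or.inr rfl)
  · intro x
    constructor
    · intro hx
      exact absurd hx (by simp [PySem.Set.empty])
    · rintro ⟨k, hk, a, ha1, hat, hpa, hadds⟩
      omega
  · rw [resVal_one]
    norm_num


-- ## B side: the while loop recomputes zN, the window (l, r) only seeds it

theorem extendB_eq (cs : List Char) (t : Nat) (ht : 1 ≤ t) :
    ∀ (fuel m : Nat), cs.length - m ≤ fuel →
    (∀ j, j < m → chF cs (t + j) = chF cs j) → t + m ≤ cs.length →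
    extendB cs (t:Int) (m:Int) = ((zN cs t : Nat) : Int) := by
  intro fuel
  induction fuel with
  | zero =>
    intro m hfuel hmatch hle
    exact absurd hle (by omega)
  | succ fuel ih =>
    intro m hfuel hmatch hle
    rw [extendB]
    have hcast : (t:Int) + (m:Int) = ((t + m : Nat) : Int) := by push_cast; ring
    by_cases hcond : t + m < cs.length ∧ cs.getD m ' ' = cs.getD (t+m) ' '
    · have hc' : (t:Int)+(m:Int) < (cs.length:Int)
          ∧ PySem.List.pyGetD cs (m:Int) ' ' = PySem.List.pyGetD cs ((t:Int)+(m:Int)) ' ' := by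
        rw [hcast]
        simp only [PySem.List.pyGetD_natCast]
        exact ⟨by exact_mod_cast hcond.1, hcond.2⟩
      rw [dif_pos hc']
      have hm1 : (m:Int) + 1 = ((m+1:Nat):Int) := by push_cast; ring
      rw [hm1]
      apply ih (m+1) (by omega) ?_ (by omega)
      intro j hj
      rcases Nat.lt_or_ge j m with hjm | hjm
      · exact hmatch j hjm
      · have hjm' : j = m := by omega
        subst hjm'
        exact (hcond.2).symm
    · have hneg : ¬ ((t:Int)+(m:Int) < (cs.length:Int)
          ∧ PySem.List.pyGetD cs (m:Int) ' ' = PySem.List.pyGetD cs ((t:Int)+(m:Int)) ' ') := by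
        intro hc'
        apply hcond
        rw [hcast] at hc'
        simp only [PySem.List.pyGetD_natCast] at hc'
        exact ⟨by exact_mod_cast hc'.1, hc'.2⟩
      rw [dif_neg hneg]
      have hz : zN cs t = m := by
        apply zN_eq_of cs t m hmatch hle
        by_cases hend : t + m = cs.length
        · exact Or.inl hend
        · right
          intro heq
          exact hcond ⟨by omega, heq.symm⟩
      rw [hz]

def zList (cs : List Char) (t : Nat) : List Int :=
  (List.range cs.length).map (fun j => if 1 ≤ j ∧ j < t then ((zN cs j : Nat) : Int) else 0)

theorem zList_ge (cs : List Char) (t : Nat) (h : cs.length ≤ t) :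
    zList cs t = zList cs cs.length := by
  unfold zList
  apply List.map_congr_left
  intro j hj
  rw [List.mem_range] at hj
  by_cases h1 : 1 ≤ j
  · simp [h1, hj, Nat.lt_of_lt_of_le hj h]
  · simp [h1]

theorem zList_one (cs : List Char) : zList cs 1 = List.replicate cs.length 0 := by
  unfold zList
  rw [List.eq_replicate_iff]
  constructor
  · simp
  · intro b hb
    rw [List.mem_map] at hb
    obtain ⟨j, -, hj⟩ := hb
    rcases hj with rfl
    simp only [ite_eq_right_iff]
    intro hcond
    omega

theorem zList_set (cs : List Char) (t : Nat) (ht : 1 ≤ t) (htn : t < cs.length) :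
    (zList cs t).set t ((zN cs t : Nat) : Int) = zList cs (t+1) := by
  apply List.ext_getElem
  · simp [zList]
  · intro j hj1 hj2
    have hjn : j < cs.length := by simpa [zList] using hj2
    rw [List.getElem_set]
    unfold zList
    simp only [List.getElem_map, List.getElem_range]
    by_cases hjt : t = j
    · subst hjt
      rw [if_pos rfl, if_pos ⟨ht, by omega⟩]
    · rw [if_neg hjt]
      by_cases h1 : 1 ≤ j
      · by_cases h2 : j < t
        · rw [if_pos ⟨h1, h2⟩, if_pos ⟨h1, by omega⟩]
        · rw [if_neg (by omega), if_neg (by omega)]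
      · rw [if_neg (by omega), if_neg (by omega)]

def lrInv (cs : List Char) (t : Nat) (l r : Int) : Prop :=
  ∃ lN rN : Nat, l = (lN:Int) ∧ r = (rN:Int) ∧
    ((lN = 0 ∧ rN = 0) ∨ (1 ≤ lN ∧ lN < t ∧ rN = lN + zN cs lN))

theorem B_loop (cs : List Char) :
    ∀ (fuel t : Nat) (z : List Int) (l r : Int),
    cs.length - t ≤ fuel → 1 ≤ t →
    z = zList cs t → lrInv cs t l r →
    ((PySem.List.pyRange (t:Int) (cs.length:Int) 1).foldl (stepB cs (cs.length:Int)) (z, l, r)).1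
      = zList cs cs.length := by
  intro fuel
  induction fuel with
  | zero =>
    intro t z l r hfuel ht hz hlr
    have hn : cs.length ≤ t := by omega
    rw [PySem.List.pyRange_one_eq_nil (by exact_mod_cast hn), List.foldl_nil, hz]
    exact zList_ge cs t hn
  | succ fuel ih =>
    intro t z l r hfuel ht hz hlr
    rcases Nat.lt_or_ge t cs.length with hlt | hge
    case inr =>
      rw [PySem.List.pyRange_one_eq_nil (by exact_mod_cast hge), List.foldl_nil, hz]
      exact zList_ge cs t hge
    · rw [PySem.List.pyRange_one_cons (by exact_mod_cast hlt), List.foldl_cons]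
      obtain ⟨lN, rN, rfl, rfl, hdisj⟩ := hlr
      have hzi : extendB cs (t:Int)
          (if (t:Int) < (rN:Int) then
            min ((rN:Int) - (t:Int)) (PySem.List.pyGetD z ((t:Int) - (lN:Int)) 0) else 0)
          = ((zN cs t : Nat) : Int) := by
        by_cases hir : (t:Int) < (rN:Int)
        · rw [if_pos hir]
          have htr : t < rN := by exact_mod_cast hir
          rcases hdisj with ⟨h0, h0'⟩ | ⟨hl1, hlt', hreq⟩
          · omega
          · have hklt : lN ≤ t := by omega
            have hkcast : (t:Int) - (lN:Int) = ((t - lN : Nat) : Int) := by push_cast; omega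
            rw [hkcast, hz]
            have hkn : t - lN < cs.length := by omega
            have hget : PySem.List.pyGetD (zList cs t) ((t - lN : Nat) : Int) 0
                = ((zN cs (t - lN) : Nat) : Int) := by
              rw [PySem.List.pyGetD_natCast]
              unfold zList
              rw [PySem.List.getD_map_range _ _ _ _ hkn]
              rw [if_pos ⟨by omega, by omega⟩]
            rw [hget]
            have hrt : ((rN:Int) - (t:Int)) = ((rN - t : Nat) : Int) := by push_cast; omega
            rw [hrt, ← Nat.cast_min]
            apply extendB_eq cs t ht cs.length _ (by omega) ?_ ?_
            · intro j hj
              have hj1 : j < rN - t := by omega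
              have hj2 : j < zN cs (t - lN) := by omega
              have hzlN : zN cs lN = rN - lN := by omega
              have e1 : t + j = lN + ((t - lN) + j) := by omega
              rw [e1, zN_match cs lN ((t - lN) + j) (by omega)]
              exact zN_match cs (t - lN) j hj2
            · have hrn : rN ≤ cs.length := by
                rcases zN_add_le cs lN with h0 | hb
                · omega
                · omega
              omega
        · rw [if_neg hir]
          have h0 : (0:Int) = ((0:Nat):Int) := by norm_num
          rw [h0]
          exact extendB_eq cs t ht cs.length 0 (by omega) (fun j hj => absurd hj (by omega))
            (by omega)
      simp only [stepB]
      rw [hzi, hz]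
      have hset : PySem.List.pySetD (zList cs t) (t:Int) ((zN cs t : Nat) : Int)
          = zList cs (t+1) := by
        rw [PySem.List.pySetD_natCast]
        exact zList_set cs t ht hlt
      rw [hset]
      have hc1 : ((t:Int)) + 1 = (((t+1 : Nat)):Int) := by push_cast; ring
      rw [hc1]
      by_cases hbr : (t:Int) + ((zN cs t : Nat) : Int) > (rN:Int)
      · rw [if_pos hbr]
        apply ih (t+1) _ _ _ (by omega) (by omega) rfl
        exact ⟨t, t + zN cs t, rfl, by push_cast; ring, Or.inr ⟨ht, by omega, rfl⟩⟩
      · rw [if_neg hbr]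
        apply ih (t+1) _ _ _ (by omega) (by omega) rfl
        refine ⟨lN, rN, rfl, rfl, ?_⟩
        rcases hdisj with h | ⟨h1, h2, h3⟩
        · exact Or.inl h
        · exact Or.inr ⟨h1, by omega, h3⟩

theorem sum_map_range_int (n : Nat) (f : Nat → Int) :
    ((List.range n).map f).sum = ∑ j ∈ Finset.range n, f j := by
  induction n with
  | zero => simp
  | succ n ihn =>
    rw [List.range_succ, List.map_append, List.sum_append, Finset.sum_range_succ, ihn]
    simp

theorem zList_sum (cs : List Char) :
    (zList cs cs.length).sum
      = ((∑ i ∈ (Finset.range cs.length).filter (fun i => 1 ≤ i), zN cs i : Nat) : Int) := by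
  unfold zList
  rw [sum_map_range_int]
  rw [Finset.sum_filter]
  rw [Nat.cast_sum]
  apply Finset.sum_congr rfl
  intro j hj
  rw [Finset.mem_range] at hj
  by_cases h1 : 1 ≤ j
  · rw [if_pos ⟨h1, hj⟩, if_pos h1]
  · rw [if_neg (by omega), if_neg h1]
    norm_num

theorem B_val (s : String) :
    sumScores_alt s
      = (s.toList.length : Int)
        + ((∑ i ∈ (Finset.range s.toList.length).filter (fun i => 1 ≤ i),
            zN s.toList i : Nat) : Int) := by
  have hform : sumScores_alt s
      = ((s.toList.length : Nat) : Int)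
        + ((PySem.List.pyRange ((1:Nat):Int) ((s.toList.length : Nat):Int) 1).foldl
            (stepB s.toList ((s.toList.length : Nat):Int))
            (PySem.List.pyRepeat [0] ((s.toList.length : Nat):Int), 0, 0)).1.sum := by
    unfold sumScores_alt
    rw [PySem.Str.len_eq]
    rfl
  rw [hform]
  congr 1
  rcases Nat.eq_zero_or_pos s.toList.length with h0 | h1
  · rw [h0]
    rw [PySem.List.pyRange_one_eq_nil (by norm_num), List.foldl_nil]
    rw [PySem.List.pyRepeat_singleton]
    simp
  · have hrep : PySem.List.pyRepeat [(0:Int)] ((s.toList.length : Nat):Int)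
        = zList s.toList 1 := by
      rw [PySem.List.pyRepeat_singleton, Int.toNat_natCast, zList_one]
    rw [hrep]
    rw [B_loop s.toList s.toList.length 1 _ 0 0 (by omega) (le_refl 1) rfl
      ⟨0, 0, rfl, rfl, Or.inl ⟨rfl, rfl⟩⟩]
    exact zList_sum s.toList

-- ===== VERDICT (by name: the statement is the Claim_ definition above) =====
theorem sumScores_spec : Claim_equal_sumScores := by
  intro s _
  unfold Spec_sumScores
  rw [A_val, B_val]
  have hc : resVal s.toList s.toList.length
      = ∑ i ∈ (Finset.range s.toList.length).filter (fun i => 1 ≤ i), zN s.toList i := by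
    unfold resVal
    exact counting s.toList
  rw [hc]
  ring
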